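-- pv_equiv track=rewrite | github.com/lunalovecode/misc-problems | round_robin_tournament.py | solve
-- ===== SOURCE A (Python) =====
-- def solve(rounds):
--     wins = dict()
--     for i in range(0, len(rounds)):
--         wins[i + 1] = rounds[i].count("o")
--     wins = sorted(wins.items(), key=lambda x:x[1], reverse=True)
--     players = []
--     for w in wins:
--         players.append(str(w[0]))
--     return " ".join(players)
-- ===== SOURCE B (Python) =====
-- def solve(rounds):
--     wins = [r.count("o") for r in rounds]
--     out = []
--     for w in range(max(wins, default=0), -1, -1):
--         for i in range(len(rounds)):
--             if wins[i] == w: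
--                 out.append(str(i + 1))
--     return " ".join(out)
-- ===== Notes on version B (the rewrite author's own statement) =====
-- stated objective: alternative
-- what changed: Replaces the dict build plus stable descending sort with direct group emission: for each possible win count from the maximum down to 0, scan players in ascending order and emit those with that count, which reproduces the stable tie-break without any sort.
import Mathlib
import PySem

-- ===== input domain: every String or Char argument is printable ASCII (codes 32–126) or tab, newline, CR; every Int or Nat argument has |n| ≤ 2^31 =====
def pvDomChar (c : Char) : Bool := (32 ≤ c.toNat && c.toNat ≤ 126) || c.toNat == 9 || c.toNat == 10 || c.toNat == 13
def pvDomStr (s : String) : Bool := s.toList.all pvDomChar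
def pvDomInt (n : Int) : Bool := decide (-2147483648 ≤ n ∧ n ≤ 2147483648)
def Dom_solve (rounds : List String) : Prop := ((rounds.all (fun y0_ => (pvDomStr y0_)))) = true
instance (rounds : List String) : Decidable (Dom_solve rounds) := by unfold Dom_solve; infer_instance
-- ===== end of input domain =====

-- B replaces the dict build + stable descending sort by direct group emission (scan players in
-- ascending order for each win count from the maximum down to 0); objective: alternative algorithm.

-- ===== PORT A =====
def solve (rounds : List String) : String :=
  let wins : PySem.Dict Int Int :=
    (PySem.List.pyRange 0 (rounds.length : Int)).foldl
      (fun d i => d.insert (i + 1) ((PySem.Str.count (PySem.List.pyGetD rounds i "") "o" : Int)))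
      PySem.Dict.empty
  let winsSorted := PySem.List.sorted wins.items (fun x => x.2) true
  let players := winsSorted.foldl (fun acc w => acc ++ [PySem.Int.toStr w.1]) []
  PySem.Str.join " " players

-- ===== PORT B =====
def solve_alt (rounds : List String) : String :=
  let wins : List Int := rounds.map (fun r => (PySem.Str.count r "o" : Int))
  let out :=
    (PySem.List.pyRange (PySem.List.maxD wins (fun x => x) 0) (-1) (-1)).foldl
      (fun acc w =>
        (PySem.List.pyRange 0 (rounds.length : Int)).foldl
          (fun acc i =>
            if PySem.List.pyGetD wins i 0 = w then acc ++ [PySem.Int.toStr (i + 1)] else acc)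
          acc)
      []
  PySem.Str.join " " out

-- ===== PRECONDITION & SPEC =====
def Spec_solve (rounds : List String) (out : String) : Prop := out = solve_alt rounds
instance (rounds : List String) (out : String) : Decidable (Spec_solve rounds out) := by unfold Spec_solve; infer_instance

-- ===== CLAIM (what is proved, stated in full; the proofs are below) =====
def Claim_equal_solve : Prop := ∀ (rounds : List String), Dom_solve rounds → Spec_solve rounds (solve rounds)

-- ===== LEMMAS AND PROOFS =====

-- win count of player j+1 (0-based index j)
def pvCnt (rounds : List String) (j : Nat) : Int := (PySem.Str.count (rounds.getD j "") "o" : Int)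

-- the (player, wins) pairs of A's dict, in insertion order
def pvPairs (rounds : List String) : List (Int × Int) :=
  (List.range rounds.length).map (fun (j : Nat) => ((j : Int) + 1, pvCnt rounds j))

-- concatenation of the snd-key groups of ps, in the order of ws
def pvBlocks (ps : List (Int × Int)) (ws : List Int) : List (Int × Int) :=
  ws.flatMap (fun w => ps.filter (fun p => p.2 == w))

-- B's win-count list, its maximum-with-default, and the descending range of win counts
def pvWins (rounds : List String) : List Int :=
  rounds.map (fun r => (PySem.Str.count r "o" : Int))

def pvM (rounds : List String) : Int :=
  PySem.List.maxD (pvWins rounds) (fun x => x) 0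

def pvDesc (rounds : List String) : List Int :=
  PySem.List.pyRange (pvM rounds) (-1) (-1)

lemma pvInsert_items {κ ν : Type} [BEq κ] (d : PySem.Dict κ ν) (k : κ) (v : ν)
    (h : d.contains k = false) : (d.insert k v).items = d.items ++ [(k, v)] := by
  simp [PySem.Dict.insert, h]

lemma pvDict_items (rounds : List String) (n : Nat) :
    ((PySem.List.pyRange 0 (n : Int)).foldl
      (fun d i => d.insert (i + 1) ((PySem.Str.count (PySem.List.pyGetD rounds i "") "o" : Int)))
      (PySem.Dict.empty : PySem.Dict Int Int)).items
    = (List.range n).map (fun (j : Nat) => ((j : Int) + 1, pvCnt rounds j)) := by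
  induction n with
  | zero => simp [PySem.List.pyRange, PySem.Dict.empty]
  | succ n ih =>
    have hc : ((n + 1 : Nat) : Int) = (n : Int) + 1 := by push_cast; ring
    rw [hc, PySem.List.pyRange_one_succ_right (by omega), List.foldl_append]
    simp only [List.foldl_cons, List.foldl_nil]
    have hcon : (((PySem.List.pyRange 0 (n : Int)).foldl
      (fun d i => d.insert (i + 1) ((PySem.Str.count (PySem.List.pyGetD rounds i "") "o" : Int)))
      (PySem.Dict.empty : PySem.Dict Int Int))).contains ((n : Int) + 1) = false := by
      simp only [PySem.Dict.contains, ih, List.any_map, List.any_eq_false]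
      intro j hj
      simp only [List.mem_range] at hj
      simp only [Function.comp_apply, beq_iff_eq]
      omega
    rw [pvInsert_items _ _ _ hcon, ih, List.range_succ, List.map_append]
    simp [PySem.List.pyGetD_natCast, pvCnt]

lemma pvInsertBy_append_left {α : Type} (before : α → α → Bool) (x : α) (A B : List α)
    (h : ∀ y ∈ A, before x y = false) :
    PySem.List.insertBy before x (A ++ B) = A ++ PySem.List.insertBy before x B := by
  induction A with
  | nil => simp
  | cons a t ih =>
    simp only [List.cons_append, PySem.List.insertBy, h a (by simp)]
    simp [ih (fun y hy => h y (by simp [hy]))]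

lemma pvBlocks_mem_snd {ps : List (Int × Int)} {ws : List Int} {y : Int × Int}
    (hy : y ∈ pvBlocks ps ws) : y.2 ∈ ws := by
  simp only [pvBlocks, List.mem_flatMap, List.mem_filter] at hy
  obtain ⟨w, hw, _, he⟩ := hy
  simpa [(beq_iff_eq).mp he] using hw

lemma pvBlocks_snoc_not_mem {ps : List (Int × Int)} {ws : List Int} {x : Int × Int}
    (hw : x.2 ∉ ws) : pvBlocks (ps ++ [x]) ws = pvBlocks ps ws := by
  induction ws with
  | nil => rfl
  | cons w ws ih =>
    have hxw : (x.2 == w) = false := by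
      simp only [beq_eq_false_iff_ne, ne_eq]; intro h; exact hw (by simp [h])
    simp only [pvBlocks, List.flatMap_cons, List.filter_append, List.filter_cons, hxw] at ih ⊢
    simpa using ih (fun h => hw (List.mem_cons_of_mem _ h))

lemma pvBlocks_insert (ws : List Int) (ps : List (Int × Int)) (x : Int × Int)
    (hsort : ws.Pairwise (· > ·)) (hx : x.2 ∈ ws) :
    PySem.List.insertBy (fun a b => decide (b.2 < a.2)) x (pvBlocks ps ws)
      = pvBlocks (ps ++ [x]) ws := by
  induction ws with
  | nil => simp at hx
  | cons w ws ih =>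
    rw [List.pairwise_cons] at hsort
    obtain ⟨hlt, htail⟩ := hsort
    by_cases hxw : x.2 = w
    · have hA : ∀ y ∈ ps.filter (fun p => p.2 == w), (fun a b : Int × Int => decide (b.2 < a.2)) x y = false := by
        intro y hy
        have : y.2 = w := by simpa using (List.mem_filter.mp hy).2
        simp [this, hxw]
      have hnotmem : x.2 ∉ ws := by
        intro h; exact absurd (hlt _ h) (by simp [hxw])
      have hB : PySem.List.insertBy (fun a b : Int × Int => decide (b.2 < a.2)) x (pvBlocks ps ws)
          = x :: pvBlocks ps ws := by
        cases hps : pvBlocks ps ws with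
        | nil => simp [PySem.List.insertBy]
        | cons b t =>
          have hb : b.2 ∈ ws := pvBlocks_mem_snd (by rw [hps]; simp)
          have : decide (b.2 < x.2) = true := by simp [hxw]; exact hlt _ hb
          simp [PySem.List.insertBy, this]
      have h1 : pvBlocks ps (w :: ws) = ps.filter (fun p => p.2 == w) ++ pvBlocks ps ws := by
        simp [pvBlocks]
      rw [h1, pvInsertBy_append_left _ _ _ _ hA, hB]
      have h2 : pvBlocks (ps ++ [x]) (w :: ws)
          = (ps.filter (fun p => p.2 == w) ++ [x]) ++ pvBlocks ps ws := by
        have : pvBlocks (ps ++ [x]) ws = pvBlocks ps ws := pvBlocks_snoc_not_mem hnotmem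
        simp [pvBlocks, List.filter_append, hxw] at this ⊢
        simpa [pvBlocks] using this
      rw [h2]; simp
    · have hxmem : x.2 ∈ ws := by
        rcases List.mem_cons.mp hx with h | h
        · exact absurd h hxw
        · exact h
      have hA : ∀ y ∈ ps.filter (fun p => p.2 == w), (fun a b : Int × Int => decide (b.2 < a.2)) x y = false := by
        intro y hy
        have hy2 : y.2 = w := by simpa using (List.mem_filter.mp hy).2
        have hxlt : x.2 < w := hlt _ hxmem
        simp [hy2]; omega
      rw [show pvBlocks ps (w :: ws) = ps.filter (fun p => p.2 == w) ++ pvBlocks ps ws from by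
        simp [pvBlocks]]
      rw [pvInsertBy_append_left _ _ _ _ hA, ih htail hxmem]
      simp only [pvBlocks, List.flatMap_cons, List.filter_append, List.filter_cons]
      have hxw' : (x.2 == w) = false := beq_eq_false_iff_ne.mpr hxw
      rw [hxw']
      simp

lemma pvSorted_blocks (ws : List Int) (hsort : ws.Pairwise (· > ·)) (ps : List (Int × Int))
    (hmem : ∀ p ∈ ps, p.2 ∈ ws) :
    PySem.List.sorted ps (fun x => x.2) true = pvBlocks ps ws := by
  induction ps using List.reverseRecOn with
  | nil => simp [PySem.List.sorted, pvBlocks]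
  | append_singleton ps x ih =>
    rw [PySem.List.sorted_rev_eq_foldl_insertBy, List.foldl_append]
    simp only [List.foldl_cons, List.foldl_nil]
    rw [← PySem.List.sorted_rev_eq_foldl_insertBy,
      ih (fun p hp => hmem p (List.mem_append_left _ hp))]
    exact pvBlocks_insert ws ps x hsort (hmem x (by simp))

lemma pvRange_desc (m : Nat) :
    PySem.List.pyRange (m : Int) (-1) (-1)
      = (List.range (m + 1)).map (fun k : Nat => (m : Int) - (k : Int)) := by
  simp only [PySem.List.pyRange]
  rw [if_neg (by norm_num), if_neg (by norm_num), if_pos (by omega : (-1:Int) < (m:Int))]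
  have h : (((m:Int) - -1 + - -1 - 1) / - -1).toNat = m + 1 := by
    have : ((m:Int) - -1 + - -1 - 1) / - -1 = (m:Int) + 1 := by norm_num
    omega
  rw [h]
  exact List.map_congr_left (fun k _ => by ring)

lemma pvM_nonneg (rounds : List String) : 0 ≤ pvM rounds := by
  unfold pvM PySem.List.maxD
  cases h : PySem.List.max? (pvWins rounds) (fun x => x) with
  | none => simp
  | some v =>
    have hv := PySem.List.max?_mem h
    simp only [pvWins, List.mem_map] at hv
    obtain ⟨r, _, hr⟩ := hv
    simp [← hr]

lemma pvWins_le_M (rounds : List String) (v : Int) (hv : v ∈ pvWins rounds) : v ≤ pvM rounds := by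
  unfold pvM PySem.List.maxD
  cases h : PySem.List.max? (pvWins rounds) (fun x => x) with
  | none =>
    rw [PySem.List.max?_eq_none_iff] at h
    simp [h] at hv
  | some v' =>
    simpa using PySem.List.max?_isMax h v hv

lemma pvDesc_sorted (rounds : List String) : (pvDesc rounds).Pairwise (· > ·) := by
  unfold pvDesc
  rw [show pvM rounds = ((pvM rounds).toNat : Int) from (Int.toNat_of_nonneg (pvM_nonneg rounds)).symm,
    pvRange_desc]
  rw [List.pairwise_map]
  exact List.Pairwise.imp (by intro a b h; simp only [gt_iff_lt]; omega) List.pairwise_lt_range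

lemma pvMem_desc (rounds : List String) (v : Int) (h0 : 0 ≤ v) (hm : v ≤ pvM rounds) :
    v ∈ pvDesc rounds := by
  unfold pvDesc
  rw [show pvM rounds = ((pvM rounds).toNat : Int) from (Int.toNat_of_nonneg (pvM_nonneg rounds)).symm,
    pvRange_desc]
  refine List.mem_map.mpr ⟨((pvM rounds) - v).toNat, List.mem_range.mpr (by omega), by omega⟩

lemma pvCnt_mem_wins (rounds : List String) (j : Nat) (hj : j < rounds.length) :
    pvCnt rounds j ∈ pvWins rounds := by
  unfold pvCnt pvWins
  refine List.mem_map.mpr ⟨rounds[j], by simp, ?_⟩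
  rw [List.getD_eq_getElem rounds "" hj]

-- A's output list equals the block concatenation, mapped to player strings
lemma pvA_eq (rounds : List String) :
    solve rounds = PySem.Str.join " "
      ((pvBlocks (pvPairs rounds) (pvDesc rounds)).map (fun w => PySem.Int.toStr w.1)) := by
  unfold solve
  dsimp only []
  rw [pvDict_items rounds rounds.length]
  rw [pvSorted_blocks (pvDesc rounds) (pvDesc_sorted rounds) _ ?hmem]
  case hmem =>
    intro p hp
    simp only [List.mem_map, List.mem_range] at hp
    obtain ⟨j, hj, rfl⟩ := hp
    exact pvMem_desc rounds _ (by simp [pvCnt]) (pvWins_le_M _ _ (pvCnt_mem_wins rounds j hj))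
  rw [PySem.List.foldl_append_singleton_eq_map]
  rfl

-- B's output list as the same flatMap
lemma pvB_eq (rounds : List String) :
    solve_alt rounds = PySem.Str.join " "
      ((pvDesc rounds).flatMap (fun w =>
        ((List.range rounds.length).filter (fun j => pvCnt rounds j == w)).map
          (fun j : Nat => PySem.Int.toStr ((j : Int) + 1)))) := by
  unfold solve_alt
  dsimp only []
  congr 1
  have hinner : ∀ (w : Int) (acc : List String),
      (PySem.List.pyRange 0 (rounds.length : Int)).foldl
        (fun acc i => if PySem.List.pyGetD (pvWins rounds) i 0 = w then acc ++ [PySem.Int.toStr (i + 1)] else acc) acc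
      = acc ++ ((List.range rounds.length).filter (fun j => pvCnt rounds j == w)).map
          (fun j : Nat => PySem.Int.toStr ((j : Int) + 1)) := by
    intro w acc
    rw [PySem.List.pyRange_zero_natCast, List.foldl_map]
    refine Eq.trans (PySem.List.foldl_congr_mem _ _
      (fun acc (j : Nat) => if pvCnt rounds j == w then acc ++ [PySem.Int.toStr ((j : Int) + 1)] else acc) _ ?_)
      (PySem.List.foldl_append_if _ _ _ _)
    intro acc j hj
    have hj' : j < rounds.length := List.mem_range.mp hj
    rw [PySem.List.pyGetD_natCast]
    have hg : (pvWins rounds).getD j 0 = pvCnt rounds j := by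
      unfold pvWins pvCnt
      rw [List.getD_eq_getElem _ 0 (by simpa using hj'), List.getElem_map,
        List.getD_eq_getElem _ _ hj']
    rw [hg]
    simp [beq_iff_eq]
  refine Eq.trans (PySem.List.foldl_congr_mem _ _ _ _ (fun acc w _ => hinner w acc)) ?_
  rw [PySem.List.foldl_append_eq_flatMap]
  rfl

theorem pv_main (rounds : List String) : solve rounds = solve_alt rounds := by
  rw [pvA_eq, pvB_eq]
  congr 1
  unfold pvBlocks
  rw [List.map_flatMap]
  refine congrArg (fun f => List.flatMap f (pvDesc rounds)) (funext fun w => ?_)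
  rw [pvPairs, List.filter_map, List.map_map]
  rfl

-- ===== VERDICT (by name: the statement is the Claim_ definition above) =====
theorem solve_spec : Claim_equal_solve := by
  intro rounds _
  unfold Spec_solve
  exact pv_main rounds
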